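-- pv_equiv track=rewrite | github.com/martyav/adventofcode2018 | day_05/solution.py | find_most_problematic
-- ===== SOURCE A (Python) =====
-- import operator
--
-- def reacted_polymer_length(text):
--     new_text = ''
--     alphabet = 'abcdefghijklmnopqrstuvwxyz'
--
--     while new_text != text:
--         new_text = text
--
--         for letter in alphabet:
--             lower_first = f'{letter}{letter.upper()}'
--             upper_first = f'{letter.upper()}{letter}'
--
--             text = text.replace(lower_first,"")
--             text = text.replace(upper_first,"")
--
--     return len(new_text)
--
-- def find_most_problematic(text):
--     freq = {}
--     alphabet = 'abcdefghijklmnopqrstuvwxyz'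
--
--     for letter in alphabet:
--         new_text = text
--
--         new_text = new_text.replace(letter, '')
--         new_text = new_text.replace(letter.upper(), '')
--
--         new_polymer_length = reacted_polymer_length(new_text)
--
--         freq[letter] = new_polymer_length
--
--     most_problematic = sorted(freq.items(), key=operator.itemgetter(1))[0]
--
--     return most_problematic
-- ===== SOURCE B (Python) =====
-- def find_most_problematic(text):
--     best = None
--     for letter in 'abcdefghijklmnopqrstuvwxyz':
--         filtered = text.replace(letter, '').replace(letter.upper(), '')
--         stack = []
--         for c in filtered:
--             if stack and c != stack[-1] and c.swapcase() == stack[-1]: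
--                 stack.pop()
--             else:
--                 stack.append(c)
--         n = len(stack)
--         if best is None or n < best[1]:
--             best = (letter, n)
--     return best
-- ===== Notes on version B (the rewrite author's own statement) =====
-- stated objective: alternative
-- what changed: A reacts the polymer by repeatedly scanning for all 52 two-char patterns with str.replace until a fixed point (and picks the winner by sorting the 26 results); B does one linear stack pass per letter (pop on a case-pair match, else push) and keeps a running minimum instead of sorting.
import Mathlib
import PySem

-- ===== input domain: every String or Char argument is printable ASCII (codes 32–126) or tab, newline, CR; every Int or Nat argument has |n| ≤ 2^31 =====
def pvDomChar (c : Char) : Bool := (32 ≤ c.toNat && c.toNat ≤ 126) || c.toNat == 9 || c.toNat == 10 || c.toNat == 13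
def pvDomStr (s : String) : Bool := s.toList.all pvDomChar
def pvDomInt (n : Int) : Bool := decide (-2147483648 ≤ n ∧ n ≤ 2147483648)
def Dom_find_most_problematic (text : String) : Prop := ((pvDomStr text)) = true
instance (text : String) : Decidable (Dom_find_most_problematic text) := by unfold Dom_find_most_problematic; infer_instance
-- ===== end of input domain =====

-- B replaces A's fixed-point of repeated str.replace passes by a single stack pass per letter
-- (and a running minimum instead of sort-then-index): a different algorithm, same results.


-- ===== PORT A =====
def pvAlphabet : String := "abcdefghijklmnopqrstuvwxyz"

-- one pass of A's inner `for letter in alphabet` body (both replaces), folded over the alphabet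
def pvStepA (text : String) : String :=
  pvAlphabet.toList.foldl
    (fun t letter =>
      PySem.Str.replace
        (PySem.Str.replace t (String.ofList [letter, PySem.Chars.upperChar letter]) "")
        (String.ofList [PySem.Chars.upperChar letter, letter]) "")
    text

-- A's `while new_text != text:` loop; returns len(new_text) at exit.
-- Ported with a fuel bound (the loop shrinks the string, so length+1 rounds always suffice;
-- pvRLGo_eq below proves the fuel never runs out on the actual call).
def pvRLGo : Nat → String → String → Int
  | 0, new_text, _ => PySem.Str.len new_text
  | fuel + 1, new_text, text =>
    if new_text = text then PySem.Str.len new_text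
    else pvRLGo fuel text (pvStepA text)

def reacted_polymer_length (text : String) : Int :=
  pvRLGo (text.toList.length + 1) "" text

def find_most_problematic (text : String) : String × Int :=
  let freq : PySem.Dict String Int :=
    pvAlphabet.toList.foldl
      (fun d letter =>
        d.insert (String.ofList [letter])
          (reacted_polymer_length
            (PySem.Str.replace (PySem.Str.replace text (String.ofList [letter]) "")
              (String.ofList [PySem.Chars.upperChar letter]) "")))
      PySem.Dict.empty
  -- `sorted(freq.items(), key=itemgetter(1))[0]`; the default is unreachable (26 items)
  (PySem.List.sorted freq.items (fun p => p.2) false).headD ("", 0)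

-- ===== PORT B =====
-- Source B: `c.swapcase()`
def pvSwapcase (c : Char) : Char :=
  if PySem.Chars.islower c then PySem.Chars.upperChar c
  else if PySem.Chars.isupper c then PySem.Chars.lowerChar c
  else c

-- Source B loop body: pop when `stack and c != stack[-1] and c.swapcase() == stack[-1]`, else push
def pvPush (st : List Char) (c : Char) : List Char :=
  match st with
  | [] => [c]
  | t :: rest => if c ≠ t ∧ pvSwapcase c = t then rest else c :: t :: rest

def find_most_problematic_alt (text : String) : String × Int :=
  (pvAlphabet.toList.foldl
      (fun (best : Option (String × Int)) letter =>
        let filtered :=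
          PySem.Str.replace (PySem.Str.replace text (String.ofList [letter]) "")
            (String.ofList [PySem.Chars.upperChar letter]) ""
        let n : Int := (filtered.toList.foldl pvPush []).length
        match best with
        | none => some (String.ofList [letter], n)
        | some b => if n < b.2 then some (String.ofList [letter], n) else some b)
      none).getD ("", 0)

-- ===== PRECONDITION & SPEC =====
def Spec_find_most_problematic (text : String) (out : String × Int) : Prop := out = find_most_problematic_alt text
instance (text : String) (out : String × Int) : Decidable (Spec_find_most_problematic text out) := by unfold Spec_find_most_problematic; infer_instance

-- ===== CLAIM (what is proved, stated in full; the proofs are below) =====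
def Claim_equal_find_most_problematic : Prop := ∀ (text : String), Dom_find_most_problematic text → Spec_find_most_problematic text (find_most_problematic text)

-- ===== LEMMAS AND PROOFS =====

-- `pvDelPair a b l` = l.replace([a,b] as string, "") on the list side: leftmost non-overlapping deletions
def pvDelPair (a b : Char) : List Char → List Char
  | [] => []
  | [c] => [c]
  | c :: rest@(d :: t) => if c = a ∧ d = b then pvDelPair a b t else c :: pvDelPair a b rest

theorem pvGo_eq_delPair (a b : Char) : ∀ (fuel : Nat) (l acc : List Char), l.length ≤ fuel →
    PySem.Chars.replace.go [a, b] [] fuel l acc = acc.reverse ++ pvDelPair a b l := by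
  intro fuel
  induction fuel with
  | zero => intro l acc h; simp at h; subst h; simp [PySem.Chars.replace.go, pvDelPair]
  | succ n ih =>
    intro l acc h
    match l with
    | [] => simp [PySem.Chars.replace.go, pvDelPair]
    | [c] =>
      simp only [PySem.Chars.replace.go, pvDelPair, List.isPrefixOf]
      have : ¬ ([a, b] <+: [c]) := by
        intro hp; have := hp.length_le; simp at this
      simp only [Bool.and_false, Bool.false_eq_true, if_false]
      cases n <;> simp [PySem.Chars.replace.go]
    | c :: d :: t =>
      simp only [PySem.Chars.replace.go]
      by_cases hcd : c = a ∧ d = b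
      · obtain ⟨rfl, rfl⟩ := hcd
        have hp : [c, d].isPrefixOf (c :: d :: t) = true :=
          List.isPrefixOf_iff_prefix.mpr ⟨t, rfl⟩
        rw [hp]
        simp only [if_true, List.reverse_nil, List.nil_append, List.length_cons, List.drop_succ_cons,
          List.drop_zero, List.length_nil]
        rw [ih t acc (by simp at h; omega)]
        simp [pvDelPair]
      · have hp : [a, b].isPrefixOf (c :: d :: t) = false := by
          rw [Bool.eq_false_iff]
          intro hT
          rw [List.isPrefixOf_iff_prefix, List.cons_prefix_cons, List.cons_prefix_cons] at hT
          exact hcd ⟨hT.1.symm, hT.2.1.symm⟩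
        rw [hp]
        simp only [Bool.false_eq_true, if_false]
        rw [ih (d :: t) (c :: acc) (by simp at h ⊢; omega)]
        simp [pvDelPair, hcd]

theorem pvReplacePair_toList (s : String) (a b : Char) :
    (PySem.Str.replace s (String.ofList [a, b]) "").toList = pvDelPair a b s.toList := by
  simp only [PySem.Str.replace, PySem.Chars.replace, String.toList_ofList]
  norm_num
  rw [pvGo_eq_delPair a b _ _ _ (by rw [← String.length_toList])]
  simp

theorem pvDelPair_dichot (a b : Char) (l : List Char) :
    pvDelPair a b l = l ∨ (pvDelPair a b l).length < l.length := by
  induction l using pvDelPair.induct a b with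
  | case1 => left; simp [pvDelPair]
  | case2 c => left; simp [pvDelPair]
  | case3 c d t hcd ih =>
    right
    rw [pvDelPair, if_pos hcd]
    rcases ih with h | h
    · rw [h]; simp
    · simp; omega
  | case4 c d t hcd ih =>
    rw [pvDelPair, if_neg hcd]
    rcases ih with h | h
    · left; rw [h]
    · right; simpa using h

theorem pvStepA_dichot (t : String) :
    pvStepA t = t ∨ (pvStepA t).toList.length < t.toList.length := by
  unfold pvStepA
  generalize pvAlphabet.toList = L
  induction L generalizing t with
  | nil => left; rfl
  | cons l L ih =>
    simp only [List.foldl_cons]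
    set t1 := PySem.Str.replace t (String.ofList [l, PySem.Chars.upperChar l]) "" with ht1
    set t2 := PySem.Str.replace t1 (String.ofList [PySem.Chars.upperChar l, l]) "" with ht2
    have h1 : t1.toList = pvDelPair l (PySem.Chars.upperChar l) t.toList := pvReplacePair_toList ..
    have h2 : t2.toList = pvDelPair (PySem.Chars.upperChar l) l t1.toList := pvReplacePair_toList ..
    have hd1 := pvDelPair_dichot l (PySem.Chars.upperChar l) t.toList
    have hd2 := pvDelPair_dichot (PySem.Chars.upperChar l) l t1.toList
    have len1 : t1.toList.length ≤ t.toList.length := by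
      rw [h1]; rcases hd1 with e | e
      · rw [e]
      · omega
    have len2 : t2.toList.length ≤ t1.toList.length := by
      rw [h2]; rcases hd2 with e | e
      · rw [e]
      · omega
    rcases ih t2 with h | h
    · rcases Nat.lt_or_ge t2.toList.length t.toList.length with hlt | hge
      · right; rw [h]; exact hlt
      · have q1 : t1.toList.length = t.toList.length := by omega
        have q2 : t2.toList.length = t1.toList.length := by omega
        have e1 : t1.toList = t.toList := by
          rcases hd1 with e | e
          · rw [h1, e]
          · rw [h1] at q1; omega
        have e2 : t2.toList = t1.toList := by
          rcases hd2 with e | e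
          · rw [h2, e]
          · rw [h2] at q2; rw [h1] at q1; omega
        have heq : t2 = t := String.toList_inj.mp (by rw [e2, e1])
        left; rw [h, heq]
    · right; omega

theorem pvChar_eq_of_toNat {c d : Char} (h : c.toNat = d.toNat) : c = d := by
  have := congrArg Char.ofNat h
  rwa [Char.ofNat_toNat, Char.ofNat_toNat] at this

theorem pvToNat_ofNat {n : Nat} (h : n ≤ 122) : (Char.ofNat n).toNat = n := by
  simp [Char.ofNat]
  split
  · rfl
  · rename_i hv; exact absurd (by constructor; omega) hv

theorem pvIslower_iff (c : Char) : PySem.Chars.islower c = true ↔ 97 ≤ c.toNat ∧ c.toNat ≤ 122 := by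
  rw [PySem.Chars.islower, Bool.and_eq_true, decide_eq_true_iff, decide_eq_true_iff,
    Char.le_def, Char.le_def, UInt32.le_iff_toNat_le, UInt32.le_iff_toNat_le]
  exact Iff.rfl

theorem pvIsupper_iff (c : Char) : PySem.Chars.isupper c = true ↔ 65 ≤ c.toNat ∧ c.toNat ≤ 90 := by
  rw [PySem.Chars.isupper, Bool.and_eq_true, decide_eq_true_iff, decide_eq_true_iff,
    Char.le_def, Char.le_def, UInt32.le_iff_toNat_le, UInt32.le_iff_toNat_le]
  exact Iff.rfl

-- B's pop test as an arithmetic condition on the two code points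
theorem pvReact_iff (c d : Char) :
    (c ≠ d ∧ pvSwapcase c = d) ↔
      ((97 ≤ c.toNat ∧ c.toNat ≤ 122 ∧ d.toNat + 32 = c.toNat) ∨
       (65 ≤ c.toNat ∧ c.toNat ≤ 90 ∧ d.toNat = c.toNat + 32)) := by
  constructor
  · rintro ⟨hne, hsw⟩
    by_cases hl : PySem.Chars.islower c
    · obtain ⟨h1, h2⟩ := (pvIslower_iff c).mp hl
      rw [pvSwapcase, if_pos hl, PySem.Chars.upperChar, if_pos hl] at hsw
      have : d.toNat = c.toNat - 32 := by rw [← hsw, pvToNat_ofNat (by omega)]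
      left; omega
    · by_cases hu : PySem.Chars.isupper c
      · obtain ⟨h1, h2⟩ := (pvIsupper_iff c).mp hu
        rw [pvSwapcase, if_neg hl, if_pos hu, PySem.Chars.lowerChar, if_pos hu] at hsw
        have : d.toNat = c.toNat + 32 := by rw [← hsw, pvToNat_ofNat (by omega)]
        right; omega
      · rw [pvSwapcase, if_neg hl, if_neg hu] at hsw
        exact absurd hsw hne
  · rintro (⟨h1, h2, h3⟩ | ⟨h1, h2, h3⟩)
    · have hl : PySem.Chars.islower c = true := (pvIslower_iff c).mpr ⟨h1, h2⟩
      have hu : PySem.Chars.isupper c = false := by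
        rw [Bool.eq_false_iff]; intro hT; obtain ⟨_, _⟩ := (pvIsupper_iff c).mp hT; omega
      refine ⟨fun e => by rw [e] at h3; omega, ?_⟩
      rw [pvSwapcase, if_pos hl, PySem.Chars.upperChar, if_pos hl]
      exact pvChar_eq_of_toNat (by rw [pvToNat_ofNat (by omega)]; omega)
    · have hl : PySem.Chars.islower c = false := by
        rw [Bool.eq_false_iff]; intro hT; obtain ⟨_, _⟩ := (pvIslower_iff c).mp hT; omega
      have hu : PySem.Chars.isupper c = true := (pvIsupper_iff c).mpr ⟨h1, h2⟩
      refine ⟨fun e => by rw [e] at h3; omega, ?_⟩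
      rw [pvSwapcase, if_neg (by simp [hl]), if_pos hu, PySem.Chars.lowerChar, if_pos hu]
      exact pvChar_eq_of_toNat (by rw [pvToNat_ofNat (by omega)]; omega)

theorem pvReact_symm {c d : Char} (h : c ≠ d ∧ pvSwapcase c = d) : d ≠ c ∧ pvSwapcase d = c := by
  rw [pvReact_iff] at h ⊢
  rcases h with ⟨h1, h2, h3⟩ | ⟨h1, h2, h3⟩
  · right; omega
  · left; omega

theorem pvNoReact_symm {c d : Char} (h : ¬(c ≠ d ∧ pvSwapcase c = d)) : ¬(d ≠ c ∧ pvSwapcase d = c) :=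
  fun h' => h (pvReact_symm h')

-- the stack never holds an adjacent reactive pair
def pvInv (st : List Char) : Prop := st.IsChain (fun x y => ¬(x ≠ y ∧ pvSwapcase x = y))

theorem pvInv_push {st : List Char} (h : pvInv st) (c : Char) : pvInv (pvPush st c) := by
  match st with
  | [] => simp [pvPush, pvInv]
  | t :: rest =>
    rw [pvPush]
    split
    · exact (List.isChain_cons.mp h).2
    · rename_i hn
      exact List.isChain_cons.mpr ⟨fun y hy => by simp at hy; subst hy; exact hn, h⟩

theorem pvPush_cancel {a b : Char} (hR : a ≠ b ∧ pvSwapcase a = b) {st : List Char} (h : pvInv st) :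
    pvPush (pvPush st a) b = st := by
  match st with
  | [] =>
    rw [pvPush, pvPush, if_pos (pvReact_symm hR)]
  | x :: rest =>
    rw [pvPush]
    split
    · rename_i hax
      -- a reacted with the old top x; x = pvSwapcase a = b
      have hxb : x = b := by rw [← hax.2, ← hR.2]
      match rest with
      | [] => rw [pvPush, hxb]
      | y :: rest' =>
        have hxy : ¬(x ≠ y ∧ pvSwapcase x = y) := (List.isChain_cons.mp h).1 y rfl
        rw [pvPush, if_neg (by rw [← hxb]; exact hxy), hxb]
    · rw [pvPush, if_pos (pvReact_symm hR)]

theorem pvProc_delPair (a b : Char) (hR : a ≠ b ∧ pvSwapcase a = b) :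
    ∀ (l st : List Char), pvInv st → (pvDelPair a b l).foldl pvPush st = l.foldl pvPush st := by
  intro l
  induction l using pvDelPair.induct a b with
  | case1 => intro st _; simp [pvDelPair]
  | case2 c => intro st _; simp [pvDelPair]
  | case3 c d t hcd ih =>
    intro st hst
    obtain ⟨rfl, rfl⟩ := hcd
    rw [pvDelPair, if_pos ⟨rfl, rfl⟩]
    rw [ih st hst]
    simp only [List.foldl_cons]
    rw [pvPush_cancel hR hst]
  | case4 c d t hcd ih =>
    intro st hst
    rw [pvDelPair, if_neg hcd]
    simp only [List.foldl_cons]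
    exact ih (pvPush st c) (pvInv_push hst c)

-- irreducible strings pass through the stack unchanged
theorem pvProc_irred : ∀ (l : List Char), l.IsChain (fun x y => ¬(x ≠ y ∧ pvSwapcase x = y)) →
    ∀ (st : List Char), pvInv st →
    (∀ c s, l.head? = some c → st.head? = some s → ¬(c ≠ s ∧ pvSwapcase c = s)) →
    l.foldl pvPush st = l.reverse ++ st := by
  intro l
  induction l with
  | nil => intro _ st _ _; simp
  | cons c t ih =>
    intro hc st hst hb
    have hpush : pvPush st c = c :: st := by
      match st with
      | [] => rfl
      | s :: r => rw [pvPush, if_neg (hb c s rfl rfl)]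
    have hinv' : pvInv (c :: st) := List.isChain_cons.mpr ⟨fun y hy => hb c y rfl hy, hst⟩
    have hb' : ∀ c' s, t.head? = some c' → (c :: st).head? = some s →
        ¬(c' ≠ s ∧ pvSwapcase c' = s) := by
      intro c' s h1 h2
      simp only [List.head?_cons, Option.some.injEq] at h2
      subst h2
      exact pvNoReact_symm ((List.isChain_cons.mp hc).1 c' h1)
    simp only [List.foldl_cons, hpush]
    rw [ih (List.isChain_cons.mp hc).2 (c :: st) hinv' hb']
    simp

-- the list-level shape of pvStepA
def pvStepL (t : List Char) : List Char :=
  pvAlphabet.toList.foldl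
    (fun t letter => pvDelPair (PySem.Chars.upperChar letter) letter
                      (pvDelPair letter (PySem.Chars.upperChar letter) t)) t

set_option maxHeartbeats 1000000 in
theorem pvStepA_toList (s : String) : (pvStepA s).toList = pvStepL s.toList := by
  unfold pvStepA pvStepL
  generalize pvAlphabet.toList = L
  induction L generalizing s with
  | nil => rfl
  | cons l L ih =>
    simp only [List.foldl_cons]
    refine (ih _).trans ?_
    congr 1
    rw [pvReplacePair_toList, pvReplacePair_toList]

theorem pvMem_alpha (c : Char) (h1 : 97 ≤ c.toNat) (h2 : c.toNat ≤ 122) : c ∈ pvAlphabet.toList := by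
  have halph : pvAlphabet.toList = (List.range 26).map (fun k => Char.ofNat (97 + k)) := by decide
  rw [halph, List.mem_map]
  refine ⟨c.toNat - 97, List.mem_range.mpr (by omega), ?_⟩
  have h97 : 97 + (c.toNat - 97) = c.toNat := by omega
  rw [h97, Char.ofNat_toNat]

theorem pvFoldl_fix {f : List Char → Char → List Char}
    (hd : ∀ t c, f t c = t ∨ (f t c).length < t.length) :
    ∀ (L : List Char) (t : List Char), L.foldl f t = t → ∀ c ∈ L, f t c = t := by
  have hle : ∀ (L : List Char) (t : List Char), (L.foldl f t).length ≤ t.length := by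
    intro L
    induction L with
    | nil => intro t; exact le_refl _
    | cons c L ih =>
      intro t
      simp only [List.foldl_cons]
      refine (ih (f t c)).trans ?_
      rcases hd t c with h | h
      · rw [h]
      · omega
  intro L
  induction L with
  | nil => intro t _ c hc; simp at hc
  | cons c L ih =>
    intro t h c' hc'
    simp only [List.foldl_cons] at h
    have h2 := hle L (f t c)
    rw [h] at h2
    have hfix : f t c = t := by
      rcases hd t c with e | e
      · exact e
      · omega
    rcases List.mem_cons.mp hc' with rfl | hmem
    · exact hfix
    · rw [hfix] at h
      exact ih t h c' hmem

theorem pvDelPair_le (a b : Char) (l : List Char) : (pvDelPair a b l).length ≤ l.length := by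
  rcases pvDelPair_dichot a b l with h | h
  · rw [h]
  · omega

theorem pvDelPair_lt_of_infix {a b : Char} : ∀ {l : List Char},
    [a, b] <:+: l → (pvDelPair a b l).length < l.length := by
  intro l
  induction l using pvDelPair.induct a b with
  | case1 => intro hinf; have := hinf.length_le; simp at this
  | case2 c => intro hinf; have := hinf.length_le; simp at this
  | case3 c d t hcd ih =>
    intro _
    rw [pvDelPair, if_pos hcd]
    have := pvDelPair_le a b t
    simp only [List.length_cons]
    omega
  | case4 c d t hcd ih =>
    intro hinf
    rw [pvDelPair, if_neg hcd]
    obtain ⟨u, v, huv⟩ := hinf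
    match u with
    | [] => simp at huv; exact absurd ⟨huv.1.symm, huv.2.1.symm⟩ hcd
    | e :: u' =>
      have htail : [a, b] <:+: (d :: t) := by
        refine ⟨u', v, ?_⟩
        have := congrArg List.tail huv
        simpa using this
      have := ih htail
      simp only [List.length_cons] at this ⊢
      omega

-- a fixed point of A's replace pass has no adjacent reactive pair
theorem pvChain_of_fixed (t : List Char) (h : pvStepL t = t) :
    t.IsChain (fun x y => ¬(x ≠ y ∧ pvSwapcase x = y)) := by
  by_contra hnc
  rw [List.isChain_iff_getElem] at hnc
  push Not at hnc
  obtain ⟨i, hi, hR⟩ := hnc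
  set c := t[i] with hc
  set d := t[i+1] with hd
  have hinf : [c, d] <:+: t := by
    refine ⟨t.take i, t.drop (i+2), ?_⟩
    have d1 : t.drop i = c :: t.drop (i+1) := List.drop_eq_getElem_cons (by omega)
    have d2 : t.drop (i+1) = d :: t.drop (i+2) := List.drop_eq_getElem_cons (by omega)
    calc t.take i ++ [c, d] ++ t.drop (i + 2)
        = t.take i ++ (c :: d :: t.drop (i+2)) := by simp
      _ = t.take i ++ t.drop i := by rw [d1, d2]
      _ = t := List.take_append_drop i t
  have hdich : ∀ (u : List Char) (l : Char),
      (fun u l => pvDelPair (PySem.Chars.upperChar l) l (pvDelPair l (PySem.Chars.upperChar l) u)) u l = u ∨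
      ((fun u l => pvDelPair (PySem.Chars.upperChar l) l (pvDelPair l (PySem.Chars.upperChar l) u)) u l).length < u.length := by
    intro u l
    simp only []
    rcases pvDelPair_dichot l (PySem.Chars.upperChar l) u with e | e
    · rw [e]; exact pvDelPair_dichot (PySem.Chars.upperChar l) l u
    · right
      have := pvDelPair_le (PySem.Chars.upperChar l) l (pvDelPair l (PySem.Chars.upperChar l) u)
      omega
  have hfix := pvFoldl_fix hdich pvAlphabet.toList t h
  -- for each alphabet letter, both deletions are identities
  have hboth : ∀ l ∈ pvAlphabet.toList,
      pvDelPair l (PySem.Chars.upperChar l) t = t ∧ pvDelPair (PySem.Chars.upperChar l) l t = t := by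
    intro l hl
    have hc2 := hfix l hl
    simp only [] at hc2
    rcases pvDelPair_dichot l (PySem.Chars.upperChar l) t with e | e
    · rw [e] at hc2; exact ⟨e, hc2⟩
    · exfalso
      have h1 := pvDelPair_le (PySem.Chars.upperChar l) l (pvDelPair l (PySem.Chars.upperChar l) t)
      have h2 := congrArg List.length hc2
      omega
  rcases (pvReact_iff c d).mp hR with ⟨h1, h2, h3⟩ | ⟨h1, h2, h3⟩
  · -- c is a lowercase letter, d its uppercase partner
    have hmem := pvMem_alpha c h1 h2
    have hup : PySem.Chars.upperChar c = d := by
      rw [PySem.Chars.upperChar, if_pos ((pvIslower_iff c).mpr ⟨h1, h2⟩)]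
      exact pvChar_eq_of_toNat (by rw [pvToNat_ofNat (by omega)]; omega)
    have := (hboth c hmem).1
    rw [hup] at this
    have := congrArg List.length this
    have hlt := pvDelPair_lt_of_infix hinf
    omega
  · -- c is uppercase, d the lowercase letter
    have hd97 : 97 ≤ d.toNat := by omega
    have hd122 : d.toNat ≤ 122 := by omega
    have hmem := pvMem_alpha d hd97 hd122
    have hup : PySem.Chars.upperChar d = c := by
      rw [PySem.Chars.upperChar, if_pos ((pvIslower_iff d).mpr ⟨hd97, hd122⟩)]
      exact pvChar_eq_of_toNat (by rw [pvToNat_ofNat (by omega)]; omega)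
    have := (hboth d hmem).2
    rw [hup] at this
    have := congrArg List.length this
    have hlt := pvDelPair_lt_of_infix hinf
    omega

set_option maxRecDepth 4096 in
theorem pvProc_stepL (t : List Char) : (pvStepL t).foldl pvPush [] = t.foldl pvPush [] := by
  have hrangeB : pvAlphabet.toList.all (fun l => 97 ≤ l.toNat && l.toNat ≤ 122) = true := by decide
  have hrange : ∀ l ∈ pvAlphabet.toList, 97 ≤ l.toNat ∧ l.toNat ≤ 122 := by
    intro l hl
    have := List.all_eq_true.mp hrangeB l hl
    simpa using this
  have halph : ∀ l ∈ pvAlphabet.toList,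
      (l ≠ PySem.Chars.upperChar l ∧ pvSwapcase l = PySem.Chars.upperChar l) ∧
      (PySem.Chars.upperChar l ≠ l ∧ pvSwapcase (PySem.Chars.upperChar l) = l) := by
    intro l hl
    obtain ⟨h1, h2⟩ := hrange l hl
    have hup : (PySem.Chars.upperChar l).toNat = l.toNat - 32 := by
      rw [PySem.Chars.upperChar, if_pos ((pvIslower_iff l).mpr ⟨h1, h2⟩), pvToNat_ofNat (by omega)]
    exact ⟨(pvReact_iff _ _).mpr (Or.inl ⟨h1, h2, by omega⟩),
      (pvReact_iff _ _).mpr (Or.inr ⟨by omega, by omega, by omega⟩)⟩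
  unfold pvStepL
  generalize hL : pvAlphabet.toList = L at halph
  clear hL
  induction L generalizing t with
  | nil => rfl
  | cons l L ih =>
    simp only [List.foldl_cons]
    rw [ih _ (fun x hx => halph x (List.mem_cons_of_mem l hx))]
    have hInvNil : pvInv [] := List.IsChain.nil
    rw [pvProc_delPair _ _ ((halph l (List.mem_cons_self)).2) _ [] hInvNil,
      pvProc_delPair _ _ ((halph l (List.mem_cons_self)).1) _ [] hInvNil]

-- at a fixed point the stack pass is the identity
theorem pvProc_fixed_len (t : String) (h : pvStepA t = t) :
    (t.toList.foldl pvPush []).length = t.toList.length := by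
  have hfixL : pvStepL t.toList = t.toList := by
    have := congrArg String.toList h
    rwa [pvStepA_toList] at this
  have hchain := pvChain_of_fixed t.toList hfixL
  rw [pvProc_irred t.toList hchain [] List.IsChain.nil
    (fun c s _ h2 => by simp at h2)]
  simp

theorem pvRLGo_eq : ∀ (fuel : Nat) (t n : String), t.toList.length < fuel → n ≠ t →
    pvRLGo fuel n t = ((t.toList.foldl pvPush []).length : Int) := by
  intro fuel
  induction fuel with
  | zero => intro t n hk _; omega
  | succ fuel ih =>
    intro t n hk hne
    rw [pvRLGo, if_neg hne]
    rcases pvStepA_dichot t with h | h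
    · have hval : pvRLGo fuel t (pvStepA t) = PySem.Str.len t := by
        rw [h]
        match fuel with
        | 0 => rfl
        | fuel + 1 => rw [pvRLGo, if_pos rfl]
      rw [hval, PySem.Str.len_eq, pvProc_fixed_len t h]
    · have hne2 : t ≠ pvStepA t := by
        intro e
        rw [← e] at h
        omega
      rw [ih (pvStepA t) t (by omega) hne2, pvStepA_toList, pvProc_stepL]

theorem pvRPL_eq (s : String) :
    reacted_polymer_length s = ((s.toList.foldl pvPush []).length : Int) := by
  unfold reacted_polymer_length
  by_cases h : s = ""
  · subst h
    rw [pvRLGo, if_pos rfl]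
    decide
  · exact pvRLGo_eq (s.toList.length + 1) s "" (by omega) (Ne.symm h)

-- selection: head of the stable sort by value = running strict minimum
theorem pvInsertBy_head (bf : String × Int → String × Int → Bool) (x : String × Int) :
    ∀ (acc : List (String × Int)),
      (PySem.List.insertBy bf x acc).head? =
        some (match acc with | [] => x | y :: _ => if bf x y then x else y) := by
  intro acc
  match acc with
  | [] => rfl
  | y :: ys =>
    rw [PySem.List.insertBy]
    split <;> simp_all

theorem pvFoldl_insertBy_head {key : String × Int → Int} :
    ∀ (L : List (String × Int)) (acc : List (String × Int)) (b : String × Int),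
      acc.head? = some b →
      (L.foldl (fun acc x => PySem.List.insertBy (fun a b => decide (key a < key b)) x acc) acc).head? =
        some (L.foldl (fun b x => if key x < key b then x else b) b) := by
  intro L
  induction L with
  | nil => intro acc b h; simpa using h
  | cons x L ih =>
    intro acc b h
    match acc, h with
    | a :: t, h =>
      simp only [List.head?_cons, Option.some.injEq] at h
      subst h
      simp only [List.foldl_cons]
      refine (ih _ (if decide (key x < key a) = true then x else a) ?_).trans ?_
      · rw [pvInsertBy_head]
      · by_cases hxa : key x < key a <;> simp [hxa]

theorem pvSorted_head_eq_min (y : String × Int) (t : List (String × Int)) :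
    (PySem.List.sorted (y :: t) (fun p => p.2) false).headD ("", 0) =
      t.foldl (fun b x => if x.2 < b.2 then x else b) y := by
  rw [List.headD_eq_head?_getD, PySem.List.sorted_eq_foldl_insertBy]
  simp only [List.foldl_cons]
  rw [pvFoldl_insertBy_head (key := fun p => p.2) t (PySem.List.insertBy _ y []) y (by rfl)]
  rfl

theorem pvFoldl_pick_some :
    ∀ (L : List (String × Int)) (b : String × Int),
      L.foldl (fun (best : Option (String × Int)) p =>
          match best with
          | none => some p
          | some b => if p.2 < b.2 then some p else some b) (some b) =
        some (L.foldl (fun b x => if x.2 < b.2 then x else b) b) := by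
  intro L
  induction L with
  | nil => intro b; rfl
  | cons p L ih =>
    intro b
    simp only [List.foldl_cons]
    by_cases h : p.2 < b.2 <;> simp only [h, ite_true, ite_false] <;> exact ih _

theorem pvSelect (a : Char) (rest : List Char) (g : Char → String × Int) :
    (PySem.List.sorted ((a :: rest).map g) (fun p => p.2) false).headD ("", 0) =
      ((a :: rest).foldl (fun (best : Option (String × Int)) letter =>
          match best with
          | none => some (g letter)
          | some b => if (g letter).2 < b.2 then some (g letter) else some b) none).getD ("", 0) := by
  have hfold : ∀ (M : List Char) (acc : Option (String × Int)),
      M.foldl (fun (best : Option (String × Int)) letter =>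
          match best with
          | none => some (g letter)
          | some b => if (g letter).2 < b.2 then some (g letter) else some b) acc =
        (M.map g).foldl (fun (best : Option (String × Int)) p =>
          match best with
          | none => some p
          | some b => if p.2 < b.2 then some p else some b) acc := by
    intro M
    induction M with
    | nil => intro acc; rfl
    | cons x M ih => intro acc; simp only [List.map_cons, List.foldl_cons]; exact ih _
  rw [hfold]
  simp only [List.map_cons, List.foldl_cons]
  rw [pvFoldl_pick_some, pvSorted_head_eq_min]
  rfl

-- ===== VERDICT (by name: the statement is the Claim_ definition above) =====
theorem find_most_problematic_spec : Claim_equal_find_most_problematic := by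
  intro text _
  unfold Spec_find_most_problematic find_most_problematic find_most_problematic_alt
  have hitems :
      (pvAlphabet.toList.foldl
        (fun (d : PySem.Dict String Int) letter =>
          d.insert (String.ofList [letter])
            (reacted_polymer_length
              (PySem.Str.replace (PySem.Str.replace text (String.ofList [letter]) "")
                (String.ofList [PySem.Chars.upperChar letter]) "")))
        PySem.Dict.empty).items =
      pvAlphabet.toList.map (fun letter =>
        (String.ofList [letter],
          reacted_polymer_length
            (PySem.Str.replace (PySem.Str.replace text (String.ofList [letter]) "")
              (String.ofList [PySem.Chars.upperChar letter]) ""))) := by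
    have := PySem.Dict.items_foldl_insert_fresh (κ := String) (ν := Int)
      pvAlphabet.toList (fun letter => String.ofList [letter])
      (fun letter => reacted_polymer_length
        (PySem.Str.replace (PySem.Str.replace text (String.ofList [letter]) "")
          (String.ofList [PySem.Chars.upperChar letter]) ""))
      PySem.Dict.empty
      (fun a _ => PySem.Dict.contains_empty _)
      (by decide)
    simpa using this
  have hmap : pvAlphabet.toList.map (fun letter =>
        (String.ofList [letter],
          reacted_polymer_length
            (PySem.Str.replace (PySem.Str.replace text (String.ofList [letter]) "")
              (String.ofList [PySem.Chars.upperChar letter]) ""))) =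
      pvAlphabet.toList.map (fun letter =>
        (String.ofList [letter],
          (((PySem.Str.replace (PySem.Str.replace text (String.ofList [letter]) "")
              (String.ofList [PySem.Chars.upperChar letter]) "").toList.foldl pvPush []).length : Int))) := by
    refine List.map_congr_left ?_
    intro a _
    rw [pvRPL_eq]
  simp only [hitems, hmap]
  have halpha : pvAlphabet.toList = 'a' :: "bcdefghijklmnopqrstuvwxyz".toList := by decide
  rw [halpha]
  exact pvSelect 'a' "bcdefghijklmnopqrstuvwxyz".toList
    (fun letter =>
      (String.ofList [letter],
        (((PySem.Str.replace (PySem.Str.replace text (String.ofList [letter]) "")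
            (String.ofList [PySem.Chars.upperChar letter]) "").toList.foldl pvPush []).length : Int)))
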